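-- pv_equiv track=rewrite | github.com/corail-research/seahorse | examples/abalone/game_state_abalone.py | in_hexa
-- ===== SOURCE A (Python) =====
-- def in_hexa(index) -> bool:
--     """
--     Check if a given index is within the hexagonal game board.
--
--     Args:
--         index: The index to check.
--
--     Returns:
--         bool: True if the index is within the hexagonal game board, False otherwise.
--     """
--     for i in range(4):
--         for j in range(4 - i - 1, -1, -1):
--             if index == (i, j):
--                 return False
--         for j in range(5 + i, 9, 1):
--             if index == (i, j):
--                 return False
--     compteur = 0
--     for i in range(16, 12, -1):
--         for j in range(4 - 1 - compteur, -1, -1):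
--             if index == (i, j):
--                 return False
--         for j in range(5 + compteur, 9, 1):
--             if index == (i, j):
--                 return False
--         compteur += 1
--
--     return True
-- ===== SOURCE B (Python) =====
-- def in_hexa(index) -> bool:
--     if not (isinstance(index, tuple) and len(index) == 2):
--         return True
--     i, j = index
--     if i in (0, 1, 2, 3):
--         c = int(i)
--     elif i in (13, 14, 15, 16):
--         c = 16 - int(i)
--     else:
--         return True
--     return not (j in range(0, 4 - c) or j in range(5 + c, 9))
-- ===== Notes on version B (the rewrite author's own statement) =====
-- stated objective: simpler
-- what changed: A scans every excluded border point of the hexagon with nested loops comparing the tuple against each; B classifies the row i into an edge offset c and decides membership with a closed-form bounds check on j.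
import Mathlib
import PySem

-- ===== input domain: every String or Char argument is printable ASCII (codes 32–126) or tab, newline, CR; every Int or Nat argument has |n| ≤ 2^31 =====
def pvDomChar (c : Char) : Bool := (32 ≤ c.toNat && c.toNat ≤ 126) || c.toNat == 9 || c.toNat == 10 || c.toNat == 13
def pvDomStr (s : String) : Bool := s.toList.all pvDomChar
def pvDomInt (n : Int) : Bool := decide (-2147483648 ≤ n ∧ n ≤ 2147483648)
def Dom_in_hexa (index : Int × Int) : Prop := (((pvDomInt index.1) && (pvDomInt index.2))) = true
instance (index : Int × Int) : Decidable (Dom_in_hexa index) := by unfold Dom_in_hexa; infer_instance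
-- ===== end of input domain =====

-- B replaces A's nested enumeration of excluded border cells by a closed-form arithmetic bounds check on the row/column (objective: simpler).


-- ===== PORT A =====
def in_hexa (index : Int × Int) : Bool :=
  -- first block: for i in range(4) with two inner scans (early return False on match)
  if (PySem.List.pyRange 0 4 1).any (fun i =>
      ((PySem.List.pyRange (4 - i - 1) (-1) (-1)).any (fun j => decide (index = (i, j)))) ||
      ((PySem.List.pyRange (5 + i) 9 1).any (fun j => decide (index = (i, j))))) then
    false
  else
    -- second block: for i in range(16, 12, -1) with the compteur accumulator
    let st := (PySem.List.pyRange 16 12 (-1)).foldl (fun (st : Int × Bool) i =>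
      let compteur := st.1
      let found := st.2 ||
        ((PySem.List.pyRange (4 - 1 - compteur) (-1) (-1)).any (fun j => decide (index = (i, j)))) ||
        ((PySem.List.pyRange (5 + compteur) 9 1).any (fun j => decide (index = (i, j))))
      (compteur + 1, found)) (0, false)
    !st.2

-- ===== PORT B =====
def in_hexa_alt (index : Int × Int) : Bool :=
  let i := index.1
  let j := index.2
  if i = 0 ∨ i = 1 ∨ i = 2 ∨ i = 3 then
    let c := i
    !((0 ≤ j ∧ j < 4 - c) ∨ (5 + c ≤ j ∧ j < 9) : Bool)
  else if i = 13 ∨ i = 14 ∨ i = 15 ∨ i = 16 then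
    let c := 16 - i
    !((0 ≤ j ∧ j < 4 - c) ∨ (5 + c ≤ j ∧ j < 9) : Bool)
  else
    true

-- ===== PRECONDITION & SPEC =====
def Spec_in_hexa (index : Int × Int) (out : Bool) : Prop := out = in_hexa_alt index
instance (index : Int × Int) (out : Bool) : Decidable (Spec_in_hexa index out) := by unfold Spec_in_hexa; infer_instance

-- ===== CLAIM (what is proved, stated in full; the proofs are below) =====
def Claim_equal_in_hexa : Prop := ∀ (index : Int × Int), Dom_in_hexa index → Spec_in_hexa index (in_hexa index)

-- ===== LEMMAS AND PROOFS =====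

-- ===== VERDICT (by name: the statement is the Claim_ definition above) =====
set_option maxRecDepth 100000 in
set_option maxHeartbeats 2000000 in
theorem in_hexa_spec : Claim_equal_in_hexa := by
  intro index _
  unfold Spec_in_hexa
  obtain ⟨i, j⟩ := index
  rw [in_hexa, in_hexa_alt]
  rw [show PySem.List.pyRange 0 4 1 = [0, 1, 2, 3] from by decide,
      show PySem.List.pyRange 16 12 (-1) = [16, 15, 14, 13] from by decide]
  simp only [List.any_cons, List.any_nil, List.foldl]
  norm_num
  rw [show PySem.List.pyRange 3 (-1) (-1) = [3, 2, 1, 0] from by decide,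
      show PySem.List.pyRange 2 (-1) (-1) = [2, 1, 0] from by decide,
      show PySem.List.pyRange 1 (-1) (-1) = [1, 0] from by decide,
      show PySem.List.pyRange 0 (-1) (-1) = [0] from by decide,
      show PySem.List.pyRange 5 9 1 = [5, 6, 7, 8] from by decide,
      show PySem.List.pyRange 6 9 1 = [6, 7, 8] from by decide,
      show PySem.List.pyRange 7 9 1 = [7, 8] from by decide,
      show PySem.List.pyRange 8 9 1 = [8] from by decide]
  simp only [List.any_cons, List.any_nil, Bool.or_false]
  have hcase : i = 0 ∨ i = 1 ∨ i = 2 ∨ i = 3 ∨ i = 13 ∨ i = 14 ∨ i = 15 ∨ i = 16 ∨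
      (¬i = 0 ∧ ¬i = 1 ∧ ¬i = 2 ∧ ¬i = 3 ∧ ¬i = 13 ∧ ¬i = 14 ∧ ¬i = 15 ∧ ¬i = 16) := by
    omega
  obtain h | h | h | h | h | h | h | h | h := hcase
  · subst h; simp; rw [Bool.eq_iff_iff]
    simp only [Bool.and_eq_true, Bool.or_eq_true, Bool.not_eq_true', decide_eq_false_iff_not]
    omega
  · subst h; simp; rw [Bool.eq_iff_iff]
    simp only [Bool.and_eq_true, Bool.or_eq_true, Bool.not_eq_true', decide_eq_false_iff_not]
    omega
  · subst h; simp; rw [Bool.eq_iff_iff]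
    simp only [Bool.and_eq_true, Bool.or_eq_true, Bool.not_eq_true', decide_eq_false_iff_not]
    omega
  · subst h; simp; rw [Bool.eq_iff_iff]
    simp only [Bool.and_eq_true, Bool.or_eq_true, Bool.not_eq_true', decide_eq_false_iff_not]
    omega
  · subst h; simp; rw [Bool.eq_iff_iff]
    simp only [Bool.and_eq_true, Bool.or_eq_true, Bool.not_eq_true', decide_eq_false_iff_not]
    omega
  · subst h; simp; rw [Bool.eq_iff_iff]
    simp only [Bool.and_eq_true, Bool.or_eq_true, Bool.not_eq_true', decide_eq_false_iff_not]
    omega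
  · subst h; simp; rw [Bool.eq_iff_iff]
    simp only [Bool.and_eq_true, Bool.or_eq_true, Bool.not_eq_true', decide_eq_false_iff_not]
    omega
  · subst h; simp; rw [Bool.eq_iff_iff]
    simp only [Bool.and_eq_true, Bool.or_eq_true, Bool.not_eq_true', decide_eq_false_iff_not]
    omega
  · simp [h.1, h.2.1, h.2.2.1, h.2.2.2.1, h.2.2.2.2.1, h.2.2.2.2.2.1,
      h.2.2.2.2.2.2.1, h.2.2.2.2.2.2.2]
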